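-- pv_equiv track=rewrite | github.com/cloud-py-api/nextcloud-mcp-server | src/nc_mcp_server/tools/contacts.py | _parse_org_components
-- ===== SOURCE A (Python) =====
-- def _parse_org_components(raw_value: str) -> list[str]:
--     """Split a raw vCard ORG value into unescaped component strings.
--
--     Correctly distinguishes component-separator ';' from escaped '\\;' (literal
--     semicolon within a component).  Also unescapes \\\\, \\, and \\n.
--     """
--     components: list[str] = []
--     current: list[str] = []
--     i = 0
--     while i < len(raw_value):
--         if raw_value[i] == "\\" and i + 1 < len(raw_value):
--             nc = raw_value[i + 1]
--             if nc == ";":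
--                 current.append(";")
--             elif nc == ",":
--                 current.append(",")
--             elif nc in ("n", "N"):
--                 current.append("\n")
--             elif nc == "\\":
--                 current.append("\\")
--             else:
--                 current.append(raw_value[i : i + 2])
--             i += 2
--         elif raw_value[i] == ";":
--             components.append("".join(current))
--             current = []
--             i += 1
--         else:
--             current.append(raw_value[i])
--             i += 1
--     components.append("".join(current))
--     return components
-- ===== SOURCE B (Python) =====
-- def _unescape(piece: str) -> str:
--     out = []
--     i = 0
--     n = len(piece)
--     while i < n:
--         c = piece[i]
--         if c == "\\" and i + 1 < n:
--             nc = piece[i + 1]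
--             if nc == ";":
--                 out.append(";")
--             elif nc == ",":
--                 out.append(",")
--             elif nc in ("n", "N"):
--                 out.append("\n")
--             elif nc == "\\":
--                 out.append("\\")
--             else:
--                 out.append(piece[i : i + 2])
--             i += 2
--         else:
--             out.append(c)
--             i += 1
--     return "".join(out)
--
--
-- def _parse_org_components(raw_value: str) -> list[str]:
--     """Split on unescaped ';' first (keeping escape pairs intact), then
--     unescape each raw piece separately."""
--     pieces = []
--     cur = []
--     i = 0
--     n = len(raw_value)
--     while i < n:
--         c = raw_value[i]
--         if c == "\\" and i + 1 < n:
--             cur.append(raw_value[i : i + 2])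
--             i += 2
--         elif c == ";":
--             pieces.append("".join(cur))
--             cur = []
--             i += 1
--         else:
--             cur.append(c)
--             i += 1
--     pieces.append("".join(cur))
--     return [_unescape(p) for p in pieces]
-- ===== Notes on version B (the rewrite author's own statement) =====
-- stated objective: alternative
-- what changed: Replaced A's single fused loop (unescaping while scanning for separators) by two differently-shaped passes: a structural split into raw escape-preserving pieces at unescaped separators, then a separate per-piece unescape transform.
import Mathlib
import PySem

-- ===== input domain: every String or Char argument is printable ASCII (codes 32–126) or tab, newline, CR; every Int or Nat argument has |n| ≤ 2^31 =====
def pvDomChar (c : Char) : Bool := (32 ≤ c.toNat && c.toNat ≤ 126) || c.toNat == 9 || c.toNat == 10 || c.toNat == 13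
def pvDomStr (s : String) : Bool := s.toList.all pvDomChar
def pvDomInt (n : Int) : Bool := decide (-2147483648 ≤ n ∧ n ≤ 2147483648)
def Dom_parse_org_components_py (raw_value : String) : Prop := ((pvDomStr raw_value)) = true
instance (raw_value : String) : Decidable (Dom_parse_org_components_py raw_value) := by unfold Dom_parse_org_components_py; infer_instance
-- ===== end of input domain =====

-- B replaces A's fused scan-and-unescape loop by two passes (split at unescaped separators,
-- then unescape each raw piece); same values, alternative decomposition.

-- ===== PORT A =====
-- A's while-loop over the index, with `components`/`current` as accumulators; `current`
-- (a list of strings joined at the end in Python) is kept as the joined List Char.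
def pvGoA : List Char → List String → List Char → List String
  | [], comps, cur => comps ++ [String.mk cur]
  | '\\' :: c2 :: rest, comps, cur =>
      if c2 = ';' then pvGoA rest comps (cur ++ [';'])
      else if c2 = ',' then pvGoA rest comps (cur ++ [','])
      else if c2 = 'n' ∨ c2 = 'N' then pvGoA rest comps (cur ++ ['\n'])
      else if c2 = '\\' then pvGoA rest comps (cur ++ ['\\'])
      else pvGoA rest comps (cur ++ ['\\', c2])
  | c :: rest, comps, cur =>
      if c = ';' then pvGoA rest (comps ++ [String.mk cur]) []
      else pvGoA rest comps (cur ++ [c])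

def parse_org_components_py (raw_value : String) : List String :=
  pvGoA raw_value.toList [] []

-- ===== PORT B =====
-- Source B's first pass: split into raw pieces at unescaped separators (escape pairs kept intact).
def pvSplitRawB : List Char → List Char → List (List Char)
  | [], cur => [cur]
  | '\\' :: c2 :: rest, cur => pvSplitRawB rest (cur ++ ['\\', c2])
  | c :: rest, cur =>
      if c = ';' then cur :: pvSplitRawB rest []
      else pvSplitRawB rest (cur ++ [c])

-- Source B's second pass: unescape one raw piece.
def pvUnescB : List Char → List Char
  | [] => []
  | '\\' :: c2 :: rest =>
      (if c2 = ';' then [';'] else if c2 = ',' then [','] else if c2 = 'n' ∨ c2 = 'N' then ['\n']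
       else if c2 = '\\' then ['\\'] else ['\\', c2]) ++ pvUnescB rest
  | c :: rest => c :: pvUnescB rest

def parse_org_components_py_alt (raw_value : String) : List String :=
  (pvSplitRawB raw_value.toList []).map (fun p => String.mk (pvUnescB p))

-- ===== PRECONDITION & SPEC =====
def Spec_parse_org_components_py (raw_value : String) (out : List String) : Prop := out = parse_org_components_py_alt raw_value
instance (raw_value : String) (out : List String) : Decidable (Spec_parse_org_components_py raw_value out) := by unfold Spec_parse_org_components_py; infer_instance

-- ===== CLAIM (what is proved, stated in full; the proofs are below) =====
def Claim_equal_parse_org_components_py : Prop := ∀ (raw_value : String), Dom_parse_org_components_py raw_value → Spec_parse_org_components_py raw_value (parse_org_components_py raw_value)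

-- ===== LEMMAS AND PROOFS =====

-- prepend x onto the first element (the head piece currently being assembled)
def pvPF (x : List Char) : List (List Char) → List (List Char)
  | [] => [x]
  | h :: t => (x ++ h) :: t

theorem pvPF_pvPF (a b : List Char) (l : List (List Char)) :
    pvPF a (pvPF b l) = pvPF (a ++ b) l := by
  cases l <;> simp [pvPF]

theorem pvUnescB_cons (c : Char) (hc : c ≠ '\\') (t : List Char) :
    pvUnescB (c :: t) = c :: pvUnescB t := by
  rw [pvUnescB.eq_def]
  split
  · rename_i heq; simp at heq
  · rename_i heq; injection heq with h1 _; exact absurd h1 hc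
  · rename_i heq; injection heq with h1 h2; subst h1; subst h2; rfl

theorem pvSplitRawB_ne_nil : ∀ (n : Nat) (cs : List Char), cs.length ≤ n →
    ∀ cur, pvSplitRawB cs cur ≠ [] := by
  intro n
  induction n with
  | zero =>
    intro cs h cur
    have : cs = [] := by cases cs <;> simp_all
    subst this
    rw [pvSplitRawB.eq_def]; simp
  | succ n ih =>
    intro cs h cur
    match cs with
    | [] => rw [pvSplitRawB.eq_def]; simp
    | '\\' :: c2 :: rest =>
      simp only [pvSplitRawB]
      exact ih rest (by simp at h; omega) _
    | c :: rest =>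
      rw [pvSplitRawB.eq_def]
      split
      · rename_i heq; simp at heq
      · rename_i heq
        injection heq with h1 h2; subst h2
        exact ih _ (by simp at h; omega) _
      · rename_i heq
        injection heq with h1 h2; subst h2
        split
        · simp
        · exact ih _ (by simp at h; omega) _

theorem pvSplitRawB_acc : ∀ (n : Nat) (cs : List Char), cs.length ≤ n →
    ∀ cur, pvSplitRawB cs cur = pvPF cur (pvSplitRawB cs []) := by
  intro n
  induction n with
  | zero =>
    intro cs h cur
    have : cs = [] := by cases cs <;> simp_all
    subst this; simp [pvSplitRawB, pvPF]
  | succ n ih =>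
    intro cs h cur
    match cs with
    | [] => simp [pvSplitRawB, pvPF]
    | '\\' :: c2 :: rest =>
      have hlen : rest.length ≤ n := by simp at h; omega
      simp only [pvSplitRawB, List.nil_append]
      rw [ih rest hlen (cur ++ ['\\', c2]), ih rest hlen ['\\', c2], pvPF_pvPF]
    | c :: rest =>
      have hlen : rest.length ≤ n := by simp at h; omega
      by_cases hc : c = '\\'
      · subst hc
        cases rest with
        | nil =>
          have e : ∀ cur' : List Char, pvSplitRawB ['\\'] cur' = [cur' ++ ['\\']] := fun _ => rfl
          rw [e, e]; simp [pvPF]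
        | cons c2 rest' =>
          have hlen' : rest'.length ≤ n := by simp at h; omega
          simp only [pvSplitRawB, List.nil_append]
          rw [ih rest' hlen' (cur ++ ['\\', c2]), ih rest' hlen' ['\\', c2], pvPF_pvPF]
      · have e : ∀ cur' : List Char, pvSplitRawB (c :: rest) cur'
            = if c = ';' then cur' :: pvSplitRawB rest [] else pvSplitRawB rest (cur' ++ [c]) := by
          intro cur'
          rw [pvSplitRawB.eq_def]
          split
          · rename_i heq; simp at heq
          · rename_i heq; injection heq with h1 _; exact absurd h1 hc
          · rename_i heq; injection heq with h1 h2; subst h1; subst h2; rfl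
        rw [e, e]
        by_cases hsc : c = ';'
        · simp [hsc, pvPF]
        · simp only [hsc, if_false, List.nil_append]
          rw [ih rest hlen (cur ++ [c]), ih rest hlen [c], pvPF_pvPF]

theorem pvMap_pvPF_pair (c2 : Char) (l : List (List Char)) :
    (pvPF ['\\', c2] l).map pvUnescB = pvPF (pvUnescB ['\\', c2]) (l.map pvUnescB) := by
  cases l with
  | nil => simp [pvPF]
  | cons h t => simp [pvPF, pvUnescB]

theorem pvMap_pvPF_single (c : Char) (hc : c ≠ '\\') (l : List (List Char)) :
    (pvPF [c] l).map pvUnescB = pvPF [c] (l.map pvUnescB) := by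
  cases l with
  | nil => simp [pvPF, pvUnescB_cons c hc, pvUnescB]
  | cons h t =>
    have : ([c] ++ h : List Char) = c :: h := rfl
    simp [pvPF, this, pvUnescB_cons c hc]

theorem pvMain : ∀ (n : Nat) (cs : List Char), cs.length ≤ n →
    ∀ comps esccur,
      pvGoA cs comps esccur
        = comps ++ (pvPF esccur ((pvSplitRawB cs []).map pvUnescB)).map String.mk := by
  intro n
  induction n with
  | zero =>
    intro cs h comps esccur
    have : cs = [] := by cases cs <;> simp_all
    subst this; simp [pvGoA, pvSplitRawB, pvUnescB, pvPF]
  | succ n ih =>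
    intro cs h comps esccur
    cases cs with
    | nil => simp [pvGoA, pvSplitRawB, pvUnescB, pvPF]
    | cons c rest =>
      have hlen : rest.length ≤ n := by simp at h; omega
      by_cases hc : c = '\\'
      · subst hc
        cases rest with
        | nil =>
          have e1 : pvGoA ['\\'] comps esccur = comps ++ [String.mk (esccur ++ ['\\'])] := rfl
          have e2 : pvSplitRawB ['\\'] [] = [['\\']] := rfl
          have e3 : pvUnescB ['\\'] = ['\\'] := rfl
          rw [e1, e2]; simp [pvPF, e3]
        | cons c2 rest' =>
          have hlen' : rest'.length ≤ n := by simp at h; omega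
          have hsplit : pvSplitRawB ('\\' :: c2 :: rest') [] = pvPF ['\\', c2] (pvSplitRawB rest' []) := by
            simp only [pvSplitRawB, List.nil_append]
            exact pvSplitRawB_acc n rest' hlen' ['\\', c2]
          rw [hsplit, pvMap_pvPF_pair, pvPF_pvPF]
          have htok : ∀ tok, tok = pvUnescB ['\\', c2] →
              pvGoA rest' comps (esccur ++ tok)
                = comps ++ (pvPF (esccur ++ pvUnescB ['\\', c2]) ((pvSplitRawB rest' []).map pvUnescB)).map String.mk := by
            intro tok htk; rw [htk]; exact ih rest' hlen' comps _
          simp only [pvGoA]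
          split
          · exact htok _ (by simp_all [pvUnescB])
          · split
            · exact htok _ (by simp_all [pvUnescB])
            · split
              · exact htok _ (by simp_all [pvUnescB])
              · split
                · exact htok _ (by simp_all [pvUnescB])
                · exact htok _ (by simp_all [pvUnescB])
      · by_cases hsc : c = ';'
        · subst hsc
          have hA : pvGoA (';' :: rest) comps esccur = pvGoA rest (comps ++ [String.mk esccur]) [] := by
            rw [pvGoA.eq_def]; simp
          have hS : pvSplitRawB (';' :: rest) [] = [] :: pvSplitRawB rest [] := by
            rw [pvSplitRawB.eq_def]; simp
          rw [hA, hS, ih rest hlen]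
          have hne := pvSplitRawB_ne_nil n rest hlen []
          cases hsr : pvSplitRawB rest [] with
          | nil => exact absurd hsr hne
          | cons h t => simp [pvPF, pvUnescB]
        · have hA : pvGoA (c :: rest) comps esccur = pvGoA rest comps (esccur ++ [c]) := by
            rw [pvGoA.eq_def]
            split
            · rename_i heq; simp at heq
            · rename_i heq; injection heq with h1 _; exact absurd h1 hc
            · rename_i heq; injection heq with h1 h2; subst h1; subst h2; simp [hsc]
          have hS : pvSplitRawB (c :: rest) [] = pvPF [c] (pvSplitRawB rest []) := by
            rw [pvSplitRawB.eq_def]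
            split
            · rename_i heq; simp at heq
            · rename_i heq; injection heq with h1 _; exact absurd h1 hc
            · rename_i heq; injection heq with h1 h2; subst h1; subst h2
              simp only [hsc, if_false, List.nil_append]
              exact pvSplitRawB_acc n rest hlen [c]
          rw [hA, hS, pvMap_pvPF_single c hc, pvPF_pvPF, ih rest hlen]

-- ===== VERDICT (by name: the statement is the Claim_ definition above) =====
theorem parse_org_components_py_spec : Claim_equal_parse_org_components_py := by
  intro raw_value _
  unfold Spec_parse_org_components_py parse_org_components_py parse_org_components_py_alt
  rw [pvMain raw_value.toList.length raw_value.toList (le_refl _) [] []]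
  have hne := pvSplitRawB_ne_nil raw_value.toList.length raw_value.toList (le_refl _) []
  cases hsr : pvSplitRawB raw_value.toList [] with
  | nil => exact absurd hsr hne
  | cons h t => simp [pvPF]
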